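-- pv_equiv track=rewrite | github.com/Vano1702/fict_dev_school_hw_5 | yvanavr_2_1.py | max_honor
-- ===== SOURCE A (Python) =====
-- def max_honor(honor, leaders):
--     n = int(len(honor)/leaders)
--     sums = []
--
--     for i in range(n):
--         current_sum = 0
--         for j in range(i, len(honor), n):
--             current_sum += honor[j]
--         sums.append(current_sum)
--
--     return max(sums)
-- ===== SOURCE B (Python) =====
-- def max_honor(honor, leaders):
--     n = int(len(honor)/leaders)
--     sums = [0] * n
--     if n > 0:
--         for j, v in enumerate(honor):
--             sums[j % n] += v
--     return max(sums)
-- ===== Notes on version B (the rewrite author's own statement) =====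
-- stated objective: alternative
-- what changed: replaces A's nested group/stride loops (one strided inner scan per group) by a single enumerate pass that accumulates each element into the bucket at its position modulo n
import Mathlib
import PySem

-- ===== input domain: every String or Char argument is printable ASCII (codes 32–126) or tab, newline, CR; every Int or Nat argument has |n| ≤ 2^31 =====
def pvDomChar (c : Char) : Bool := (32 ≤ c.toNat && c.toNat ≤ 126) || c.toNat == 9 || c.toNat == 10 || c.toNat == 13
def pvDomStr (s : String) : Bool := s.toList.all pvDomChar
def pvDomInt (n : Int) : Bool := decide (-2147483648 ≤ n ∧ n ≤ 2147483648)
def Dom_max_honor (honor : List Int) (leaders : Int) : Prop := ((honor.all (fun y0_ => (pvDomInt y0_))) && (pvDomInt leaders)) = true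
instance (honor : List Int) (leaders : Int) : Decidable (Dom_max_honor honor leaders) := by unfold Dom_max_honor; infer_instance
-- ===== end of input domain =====

-- B replaces A's nested group/stride loops by one enumerate pass bucketing each element
-- at its position modulo n (alternative decomposition, same cost; return value only).

-- ===== PORT A =====
-- current_sum for group i: sum of honor[j] for j in range(i, len(honor), n)
def aInner (honor : List Int) (n : Int) (i : Int) : Int :=
  (PySem.List.pyRange i (honor.length : Int) n).foldl
    (fun acc j => acc + PySem.List.pyGetD honor j 0) 0

-- the list 'sums' built by appending one group sum per i in range(n)
def aSums (honor : List Int) (n : Int) : List Int :=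
  (PySem.List.pyRange 0 n 1).foldl (fun sums i => sums ++ [aInner honor n i]) []

def max_honor (honor : List Int) (leaders : Int) : Int :=
  let n : Int := PySem.Int.truncdiv (honor.length : Int) leaders
  ((PySem.List.max? (aSums honor n) (fun y => y)).getD 0)

-- ===== PORT B =====
-- sums[j % n] += v
def bStep (n : Int) (s : List Int) (p : Int × Int) : List Int :=
  PySem.List.pySetD s (PySem.Int.mod p.1 n)
    (PySem.List.pyGetD s (PySem.Int.mod p.1 n) 0 + p.2)

-- sums = [0]*n; if n > 0: for j, v in enumerate(honor): sums[j % n] += v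
def bSums (honor : List Int) (n : Int) : List Int :=
  let sums : List Int := List.replicate n.toNat 0
  if 0 < n then (PySem.List.enumerate honor 0).foldl (bStep n) sums else sums

def max_honor_alt (honor : List Int) (leaders : Int) : Int :=
  let n : Int := PySem.Int.truncdiv (honor.length : Int) leaders
  ((PySem.List.max? (bSums honor n) (fun y => y)).getD 0)

-- ===== PRECONDITION & SPEC =====
-- Pre_ excludes exactly the inputs where A raises: leaders = 0 (ZeroDivisionError),
-- and leaders < 0 or leaders > len(honor), where n = int(len/leaders) < 1 makes max([]) a ValueError.
def Pre_max_honor (honor : List Int) (leaders : Int) : Prop :=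
  0 < leaders ∧ leaders ≤ (honor.length : Int)
instance (honor : List Int) (leaders : Int) : Decidable (Pre_max_honor honor leaders) := by
  unfold Pre_max_honor; infer_instance

def pvWitness_max_honor : List Int × Int := ([1, 2, 3, 4], 2)

def Spec_max_honor (honor : List Int) (leaders : Int) (out : Int) : Prop := out = max_honor_alt honor leaders
instance (honor : List Int) (leaders : Int) (out : Int) : Decidable (Spec_max_honor honor leaders out) := by unfold Spec_max_honor; infer_instance

-- ===== CLAIM (what is proved, stated in full; the proofs are below) =====
def Claim_equal_max_honor : Prop := ∀ (honor : List Int) (leaders : Int), Dom_max_honor honor leaders → Pre_max_honor honor leaders → Spec_max_honor honor leaders (max_honor honor leaders)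

-- ===== LEMMAS AND PROOFS =====

-- the sum B accumulates into bucket i while scanning l with position counter starting at c
def bsum (l : List Int) (N c i : Nat) : Int :=
  ((List.range l.length).map (fun k => if (c + k) % N = i then l.getD k 0 else 0)).sum

lemma bsum_nil (N c i : Nat) : bsum [] N c i = 0 := by simp [bsum]

lemma bsum_cons (v : Int) (l : List Int) (N c i : Nat) :
    bsum (v :: l) N c i = (if c % N = i then v else 0) + bsum l N (c + 1) i := by
  unfold bsum
  rw [List.length_cons, List.range_succ_eq_map, List.map_cons, List.map_map, List.sum_cons]
  have h1 : ((fun k => if (c + k) % N = i then (v :: l).getD k 0 else 0) ∘ Nat.succ)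
      = fun k => if (c + 1 + k) % N = i then l.getD k 0 else 0 := by
    funext k
    simp only [Function.comp_apply, Nat.succ_eq_add_one, List.getD_cons_succ]
    have hc : c + (k + 1) = c + 1 + k := by omega
    rw [hc]
  rw [h1]
  simp

-- loop invariant for B's single pass
lemma binv (N : Nat) (hN : 0 < N) :
    ∀ (l s : List Int) (c : Nat), s.length = N →
      ((PySem.List.enumerate l (c : Int)).foldl (bStep (N : Int)) s).length = N ∧
      ∀ i : Nat,
        ((PySem.List.enumerate l (c : Int)).foldl (bStep (N : Int)) s).getD i 0 =
          s.getD i 0 + bsum l N c i := by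
  intro l
  induction l with
  | nil =>
      intro s c hs
      refine ⟨by simpa [PySem.List.enumerate_nil] using hs, ?_⟩
      intro i; simp [PySem.List.enumerate_nil, bsum_nil]
  | cons v l ih =>
      intro s c hs
      have hstep : bStep (N : Int) s ((c : Int), v) =
          s.set (c % N) (s.getD (c % N) 0 + v) := by
        simp only [bStep, PySem.Int.mod_natCast, PySem.List.pySetD_natCast,
          PySem.List.pyGetD_natCast]
      have hcs : ((c : Int) + 1) = ((c + 1 : Nat) : Int) := by push_cast; ring
      have hlen : (s.set (c % N) (s.getD (c % N) 0 + v)).length = N := by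
        simpa using hs
      obtain ⟨ihlen, ihget⟩ := ih (s.set (c % N) (s.getD (c % N) 0 + v)) (c + 1) hlen
      constructor
      · rw [PySem.List.enumerate_cons, List.foldl_cons, hstep, hcs]; exact ihlen
      · intro i
        rw [PySem.List.enumerate_cons, List.foldl_cons, hstep, hcs, ihget i, bsum_cons]
        have hset : (s.set (c % N) (s.getD (c % N) 0 + v)).getD i 0 =
            s.getD i 0 + (if c % N = i then v else 0) := by
          have hcm : c % N < s.length := by rw [hs]; exact Nat.mod_lt _ hN
          by_cases h : i = c % N
          · subst h
            rw [List.getD_eq_getElem _ _ (by simpa using hcm), List.getElem_set_self,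
              List.getD_eq_getElem _ _ hcm]
            simp
          · rw [List.getD, List.getD, List.getElem?_set_ne (by omega),
              if_neg (fun hh => h hh.symm), add_zero]
            rfl
        rw [hset]; ring

-- summing an indicator over range L picks the single term
lemma sum_single (L i : Nat) (c : Int) (hi : i < L) :
    ((List.range L).map (fun k => if k = i then c else 0)).sum = c := by
  induction L with
  | zero => omega
  | succ L ih =>
      rw [List.range_succ, List.map_append, List.sum_append]
      simp only [List.map_cons, List.map_nil, List.sum_cons, List.sum_nil, add_zero]
      by_cases h : i = L
      · have hz : ((List.range L).map (fun k => if k = i then c else 0)).sum = 0 := by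
          apply List.sum_eq_zero
          intro x hx
          simp only [List.mem_map, List.mem_range] at hx
          obtain ⟨k, hk, rfl⟩ := hx
          rw [if_neg (by omega)]
        rw [hz, if_pos h.symm, zero_add]
      · rw [ih (by omega), if_neg (fun hh => h hh.symm), add_zero]

-- one step of A's strided range: range(i, L, N) = [i] + range(i+N, L, N)
lemma pyRange_cons_step (i L N : Nat) (hN : 0 < N) (hiL : i < L) :
    PySem.List.pyRange (i : Int) (L : Int) (N : Int) =
      (i : Int) :: PySem.List.pyRange ((i : Int) + (N : Int)) (L : Int) (N : Int) := by
  have hNpos : (0 : Int) < (N : Int) := by exact_mod_cast hN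
  rw [PySem.List.pyRange_of_pos _ _ hNpos, PySem.List.pyRange_of_pos _ _ hNpos]
  have hM : ((L : Int) - (i : Int) + (N : Int) - 1) = (((L - i - 1 + N : Nat)) : Int) := by
    push_cast [Nat.cast_sub (by omega : i + 1 ≤ L)]
    omega
  have hdiv1 : (((L : Int) - (i : Int) + (N : Int) - 1) / (N : Int)).toNat
      = (L - i - 1) / N + 1 := by
    rw [hM, ← Int.natCast_ediv]
    rw [Int.toNat_natCast]
    exact Nat.add_div_right _ hN
  have hcnt1 : (if (i : Int) < (L : Int) then
      (((L : Int) - (i : Int) + (N : Int) - 1) / (N : Int)).toNat else 0)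
      = (L - i - 1) / N + 1 := by
    rw [if_pos (by exact_mod_cast hiL), hdiv1]
  have hcnt2 : (if (i : Int) + (N : Int) < (L : Int) then
      (((L : Int) - ((i : Int) + (N : Int)) + (N : Int) - 1) / (N : Int)).toNat else 0)
      = (L - i - 1) / N := by
    by_cases h : i + N < L
    · rw [if_pos (by exact_mod_cast h)]
      have hM2 : ((L : Int) - ((i : Int) + (N : Int)) + (N : Int) - 1)
          = (((L - i - 1 : Nat)) : Int) := by
        omega
      rw [hM2, ← Int.natCast_ediv, Int.toNat_natCast]
    · rw [if_neg (by exact_mod_cast h)]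
      have : L - i - 1 < N := by omega
      rw [Nat.div_eq_of_lt this]
  rw [hcnt1, hcnt2, List.range_succ_eq_map, List.map_cons, List.map_map]
  refine List.cons_eq_cons.mpr ⟨by simp, ?_⟩
  apply List.map_congr_left
  intro k hk
  simp only [Function.comp_apply, Nat.succ_eq_add_one]
  push_cast
  ring

-- characterisation of A's strided group sum as an indexed indicator sum
lemma aInner_eq_sum (honor : List Int) (N : Int) (j : Int) :
    aInner honor N j =
      ((PySem.List.pyRange j (honor.length : Int) N).map
        (fun x => PySem.List.pyGetD honor x 0)).sum := by
  unfold aInner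
  rw [PySem.List.foldl_add]
  ring

lemma strided (honor : List Int) (N : Nat) (hN : 0 < N) :
    ∀ (d i : Nat), honor.length - i ≤ d →
      aInner honor (N : Int) (i : Int) =
        ((List.range honor.length).map
          (fun k => if i ≤ k ∧ k % N = i % N then honor.getD k 0 else 0)).sum := by
  intro d
  induction d with
  | zero =>
      intro i hd
      have hLi : honor.length ≤ i := by omega
      have hempty : PySem.List.pyRange (i : Int) (honor.length : Int) (N : Int) = [] := by
        rw [PySem.List.pyRange_of_pos _ _ (by exact_mod_cast hN)]
        rw [if_neg (by exact_mod_cast Nat.not_lt.mpr hLi)]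
        simp
      have hz : ((List.range honor.length).map
          (fun k => if i ≤ k ∧ k % N = i % N then honor.getD k 0 else 0)).sum = 0 := by
        apply List.sum_eq_zero
        intro x hx
        simp only [List.mem_map, List.mem_range] at hx
        obtain ⟨k, hk, rfl⟩ := hx
        rw [if_neg (by omega)]
      rw [hz, aInner_eq_sum, hempty]
      simp
  | succ d ih =>
      intro i hd
      by_cases hiL : i < honor.length
      · have hrec := ih (i + N) (by omega)
        rw [aInner_eq_sum, pyRange_cons_step i honor.length N hN hiL, List.map_cons,
          List.sum_cons]
        have hcast : ((i : Int) + (N : Int)) = ((i + N : Nat) : Int) := by push_cast; ring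
        rw [hcast, ← aInner_eq_sum, hrec]
        have hpt : ∀ k : Nat,
            (if i ≤ k ∧ k % N = i % N then honor.getD k 0 else 0) =
              (if k = i then honor.getD i 0 else 0) +
                (if i + N ≤ k ∧ k % N = (i + N) % N then honor.getD k 0 else 0) := by
          intro k
          have hmod : (i + N) % N = i % N := Nat.add_mod_right i N
          rw [hmod]
          by_cases hk : k = i
          · subst hk
            rw [if_pos ⟨le_refl k, rfl⟩, if_pos rfl, if_neg (by omega)]
            ring
          · by_cases hcond : i ≤ k ∧ k % N = i % N
            · obtain ⟨ha, hb⟩ := hcond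
              have hstep : i + N ≤ k := by
                have hle : i / N ≤ k / N := Nat.div_le_div_right ha
                have h4 := Nat.div_add_mod i N
                have h5 := Nat.div_add_mod k N
                have hne : i / N ≠ k / N := by
                  intro he
                  have h6 : N * (i / N) = N * (k / N) := by rw [he]
                  exact hk (by omega)
                have hlt : i / N + 1 ≤ k / N := by omega
                have hmul : N * (i / N) + N ≤ N * (k / N) := by
                  calc N * (i / N) + N = N * (i / N + 1) := by ring
                    _ ≤ N * (k / N) := Nat.mul_le_mul_left N hlt
                omega
              rw [if_pos ⟨ha, hb⟩, if_neg hk, if_pos ⟨hstep, hb⟩]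
              ring
            · rw [if_neg hcond, if_neg hk,
                if_neg (fun h => hcond ⟨by omega, h.2⟩)]
              ring
        have hsplit : ((List.range honor.length).map
              (fun k => if i ≤ k ∧ k % N = i % N then honor.getD k 0 else 0)).sum =
            honor.getD i 0 +
              ((List.range honor.length).map
                (fun k => if i + N ≤ k ∧ k % N = (i + N) % N then honor.getD k 0 else 0)).sum := by
          rw [funext hpt, PySem.List.sum_map_add_int, sum_single _ _ _ hiL]
        rw [hsplit]
        simp [PySem.List.pyGetD_natCast]
      · -- same as base case: the range is empty
        have hLi : honor.length ≤ i := by omega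
        have hempty : PySem.List.pyRange (i : Int) (honor.length : Int) (N : Int) = [] := by
          rw [PySem.List.pyRange_of_pos _ _ (by exact_mod_cast hN)]
          rw [if_neg (by exact_mod_cast Nat.not_lt.mpr hLi)]
          simp
        have hz : ((List.range honor.length).map
            (fun k => if i ≤ k ∧ k % N = i % N then honor.getD k 0 else 0)).sum = 0 := by
          apply List.sum_eq_zero
          intro x hx
          simp only [List.mem_map, List.mem_range] at hx
          obtain ⟨k, hk, rfl⟩ := hx
          rw [if_neg (by omega)]
        rw [hz, aInner_eq_sum, hempty]
        simp

-- the two sums lists coincide for every positive bucket count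
lemma sums_eq (honor : List Int) (N : Nat) (hN : 0 < N) :
    aSums honor (N : Int) = bSums honor (N : Int) := by
  unfold aSums bSums
  rw [PySem.List.foldl_append_singleton_eq_map, List.nil_append,
    PySem.List.pyRange_zero_natCast, List.map_map]
  rw [if_pos (by exact_mod_cast hN)]
  have hinit : (List.replicate ((N : Int)).toNat (0 : Int)).length = N := by simp
  obtain ⟨hlen, hget⟩ := binv N hN honor (List.replicate ((N : Int)).toNat 0) 0 hinit
  apply List.ext_getElem
  · rw [List.length_map, List.length_range]
    simpa using hlen.symm
  · intro n h1 h2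
    rw [List.length_map, List.length_range] at h1
    rw [List.getElem_map, List.getElem_range]
    have hr : ((PySem.List.enumerate honor ((0 : Nat) : Int)).foldl
        (bStep (N : Int)) (List.replicate ((N : Int)).toNat 0)).getD n 0 =
        (List.replicate ((N : Int)).toNat (0 : Int)).getD n 0 + bsum honor N 0 n := hget n
    have hre : (List.replicate ((N : Int)).toNat (0 : Int)).getD n 0 = 0 := by
      rw [List.getD]
      rw [List.getElem?_replicate]
      split_ifs <;> rfl
    rw [hre, zero_add] at hr
    have hgoal : (Function.comp (aInner honor (N : Int)) (fun k : Nat => (k : Int))) n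
        = bsum honor N 0 n := by
      simp only [Function.comp]
      rw [strided honor N hN honor.length n (by omega)]
      unfold bsum
      apply congrArg
      apply List.map_congr_left
      intro k _
      have hnN : n % N = n := Nat.mod_eq_of_lt h1
      have hkm : k % N ≤ k := Nat.mod_le k N
      simp only [Nat.zero_add]
      by_cases hc : k % N = n
      · rw [if_pos ⟨by omega, by omega⟩, if_pos hc]
      · rw [if_neg (fun h => hc (by omega)), if_neg hc]
    rw [← List.getD_eq_getElem _ 0 h2]
    simp only [Nat.cast_zero] at hr
    rw [hr, ← hgoal]

-- ===== VERDICT (by name: the statement is the Claim_ definition above) =====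
theorem max_honor_spec : Claim_equal_max_honor := by
  unfold Claim_equal_max_honor
  intro honor leaders hDom hPre
  obtain ⟨h1, h2⟩ := hPre
  unfold Spec_max_honor
  show (PySem.List.max? (aSums honor (PySem.Int.truncdiv (honor.length : Int) leaders))
      (fun y => y)).getD 0 =
    (PySem.List.max? (bSums honor (PySem.Int.truncdiv (honor.length : Int) leaders))
      (fun y => y)).getD 0
  have hlt : leaders = ((leaders.toNat : Nat) : Int) := (Int.toNat_of_nonneg (le_of_lt h1)).symm
  have hn : PySem.Int.truncdiv (honor.length : Int) leaders
      = ((honor.length / leaders.toNat : Nat) : Int) := by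
    conv_lhs => rw [hlt]
    simp [PySem.Int.truncdiv]
  have hNpos : 0 < honor.length / leaders.toNat :=
    Nat.div_pos (by omega) (by omega)
  rw [hn, sums_eq honor _ hNpos]
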